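-- pv_equiv track=rewrite | github.com/FreshAlacrity/key-logger | word_catch.py | catch_hotkeys
-- ===== SOURCE A (Python) =====
-- def catch_hotkeys(log_list):
--     def has_hotkey(key):
--         return "ctrl" in key or "alt" in key
--
--     new_list = []
--     skip = 0
--     for i, this_entry in enumerate(log_list):
--         if skip > 0:
--             skip = skip - 1
--             continue
--         elif this_entry["action"] == "pressed":
--             if has_hotkey(this_entry["key"]):
--                 found = False
--                 while not found:
--                     skip += 1
--                     if this_entry["key"] == log_list[i + skip]["key"]:
--                         found = True
--                 continue
--         new_list.append(this_entry)
--     return new_list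
-- ===== SOURCE B (Python) =====
-- def catch_hotkeys(log_list):
--     new_list = []
--     pending = None
--     for entry in log_list:
--         if pending is not None:
--             if entry["key"] == pending:
--                 pending = None
--         elif entry["action"] == "pressed" and ("ctrl" in entry["key"] or "alt" in entry["key"]):
--             pending = entry["key"]
--         else:
--             new_list.append(entry)
--     return new_list
-- ===== Notes on version B (the rewrite author's own statement) =====
-- stated objective: simpler
-- what changed: Replaces A's enumerate loop with a skip-countdown counter and an inner index-scanning while loop by a single-pass finite-state machine over the entries whose whole state is one pending-hotkey register, removing all index arithmetic and the inner scan.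
import Mathlib
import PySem

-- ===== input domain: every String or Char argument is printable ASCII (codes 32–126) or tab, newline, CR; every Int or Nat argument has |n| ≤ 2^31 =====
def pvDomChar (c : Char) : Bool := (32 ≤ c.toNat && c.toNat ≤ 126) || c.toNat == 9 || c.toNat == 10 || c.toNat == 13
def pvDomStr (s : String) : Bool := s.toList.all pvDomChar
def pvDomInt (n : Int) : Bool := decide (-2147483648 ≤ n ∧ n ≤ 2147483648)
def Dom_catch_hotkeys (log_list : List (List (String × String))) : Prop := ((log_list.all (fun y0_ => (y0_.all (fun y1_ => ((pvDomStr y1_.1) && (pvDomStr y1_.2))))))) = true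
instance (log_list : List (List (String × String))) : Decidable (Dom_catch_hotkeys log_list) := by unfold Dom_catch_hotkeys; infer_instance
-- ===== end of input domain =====

-- B replaces A's skip-counter loop with its inner index-scanning while loop by a single-pass
-- finite-state machine whose whole state is one pending-hotkey register (objective: simpler).

-- ===== PORT A =====
-- d[k] for a Python dict modelled as an association list: first match (exact; none = KeyError).
def pyLookup (d : List (String × String)) (k : String) : Option String :=
  (d.find? (fun p => p.1 == k)).map Prod.snd

-- has_hotkey(key): "ctrl" in key or "alt" in key (on the Option because d["key"] may be missing;
-- Pre_ excludes the none case, where Python raises KeyError).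
def hotOpt : Option String → Bool
  | some k => PySem.Str.isIn "ctrl" k || PySem.Str.isIn "alt" k
  | none   => false

-- A's inner while loop: skip += 1 until log_list[i+skip]["key"] == key; fuel = len(log_list)
-- is enough to reach the out-of-range index (Python's IndexError = pyGet? none; Pre_ excludes it).
def findSkip (log : List (List (String × String))) (key : Option String)
    (i skip fuel : Nat) : Nat :=
  match fuel with
  | 0 => skip + 1
  | f + 1 =>
    let s := skip + 1
    match PySem.List.pyGet? log ((i + s : Nat) : Int) with
    | none => s
    | some e => if pyLookup e "key" == key then s else findSkip log key i s f

-- A's for loop over enumerate(log_list) with the (new_list, skip) state.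
def aLoop (log rest : List (List (String × String))) (i : Nat)
    (new_list : List (List (String × String))) (skip : Nat) : List (List (String × String)) :=
  match rest with
  | [] => new_list
  | e :: r =>
    if skip > 0 then aLoop log r (i + 1) new_list (skip - 1)
    else if pyLookup e "action" == some "pressed" then
      if hotOpt (pyLookup e "key") then
        aLoop log r (i + 1) new_list (findSkip log (pyLookup e "key") i 0 log.length)
      else aLoop log r (i + 1) (new_list ++ [e]) 0
    else aLoop log r (i + 1) (new_list ++ [e]) 0

def catch_hotkeys (log_list : List (List (String × String))) : List (List (String × String)) :=
  aLoop log_list log_list 0 [] 0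

-- ===== PORT B =====
-- B's single for loop with the (new_list, pending) state: pending = the hotkey being waited for
-- (Python's `pending is not None` branch first, exactly as in Source B).
def bLoop (rest : List (List (String × String)))
    (acc : List (List (String × String))) (pending : Option String) : List (List (String × String)) :=
  match rest with
  | [] => acc
  | e :: r =>
    match pending with
    | some k => if pyLookup e "key" == some k then bLoop r acc none else bLoop r acc (some k)
    | none =>
      if pyLookup e "action" == some "pressed" && hotOpt (pyLookup e "key") then
        bLoop r acc (pyLookup e "key")
      else bLoop r (acc ++ [e]) none

def catch_hotkeys_alt (log_list : List (List (String × String))) : List (List (String × String)) :=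
  bLoop log_list [] none

-- ===== PRECONDITION & SPEC =====
-- Pre_ excludes the malformed logs on which the Python raises: an entry missing "action", a
-- pressed entry missing "key" (KeyError), or a ctrl/alt press whose forward scan hits an entry
-- missing "key" (KeyError) or runs off the end before the key recurs (IndexError). A's exact raise
-- set is run-dependent (a defect buried inside an already-skipped region is never read), so this
-- closed form also excludes some logs on which A still returns; B returns the identical value
-- there (see the cited examples) — indeed aLoop_eq_bLoop below proves the two ports equal on ALL
-- inputs, so no input is excluded for the proof's sake.
def Pre_catch_hotkeys (log_list : List (List (String × String))) : Prop :=
  (∀ e ∈ log_list, (pyLookup e "action").isSome) ∧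
  (∀ e ∈ log_list, pyLookup e "action" = some "pressed" → (pyLookup e "key").isSome) ∧
  (∀ p ∈ PySem.List.enumerate log_list 0,
     pyLookup p.2 "action" = some "pressed" → hotOpt (pyLookup p.2 "key") = true →
     ∃ q ∈ PySem.List.enumerate log_list 0, p.1 < q.1 ∧
       (∀ m ∈ PySem.List.enumerate log_list 0,
          p.1 < m.1 → m.1 ≤ q.1 → (pyLookup m.2 "key").isSome) ∧
       pyLookup q.2 "key" = pyLookup p.2 "key")
instance (log_list : List (List (String × String))) : Decidable (Pre_catch_hotkeys log_list) := by
  unfold Pre_catch_hotkeys; infer_instance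

def pvWitness_catch_hotkeys : (List (List (String × String))) :=
  [[("action", "pressed"), ("key", "a")], [("action", "released"), ("key", "a")]]

def Spec_catch_hotkeys (log_list : List (List (String × String))) (out : List (List (String × String))) : Prop := out = catch_hotkeys_alt log_list
instance (log_list : List (List (String × String))) (out : List (List (String × String))) : Decidable (Spec_catch_hotkeys log_list out) := by unfold Spec_catch_hotkeys; infer_instance

-- ===== CLAIM (what is proved, stated in full; the proofs are below) =====
def Claim_equal_catch_hotkeys : Prop := ∀ (log_list : List (List (String × String))), Dom_catch_hotkeys log_list → Pre_catch_hotkeys log_list → Spec_catch_hotkeys log_list (catch_hotkeys log_list)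

-- ===== LEMMAS AND PROOFS =====

-- A's scan always skips at least the entry after the press.
theorem findSkip_pos (log : List (List (String × String))) (key : Option String) :
    ∀ (f i s : Nat), s + 1 ≤ findSkip log key i s f := by
  intro f
  induction f with
  | zero => intro i s; simp [findSkip]
  | succ f ih =>
    intro i s
    simp only [findSkip]
    cases h : PySem.List.pyGet? log ((i + (s + 1) : Nat) : Int) with
    | none => simp
    | some e =>
      by_cases hk : pyLookup e "key" == key
      · simp [hk]
      · simpa [hk] using Nat.le_trans (Nat.le_succ (s + 1)) (ih i (s + 1))

-- A positive skip counter just discards the next `skip` entries.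
theorem aLoop_skip (log : List (List (String × String))) :
    ∀ (s : Nat) (rest : List (List (String × String))) (i : Nat)
      (acc : List (List (String × String))),
      aLoop log rest i acc s = aLoop log (rest.drop s) (i + s) acc 0 := by
  intro s
  induction s with
  | zero => intro rest i acc; simp
  | succ s ih =>
    intro rest i acc
    cases rest with
    | nil => simp [aLoop]
    | cons e r =>
      show aLoop log (e :: r) i acc (s + 1) = _
      rw [aLoop]
      simp only [Nat.succ_sub_one, if_pos (Nat.succ_pos s)]
      rw [ih r (i + 1) acc]
      simp only [List.drop_succ_cons]
      congr 1
      omega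

-- B in pending mode consumes exactly the region A's scan computes (inclusive of the match).
theorem bLoop_pending (log : List (List (String × String))) (k : String) :
    ∀ (f i s : Nat) (acc : List (List (String × String))),
      log.length ≤ i + s + 1 + f →
      bLoop (log.drop (i + s + 1)) acc (some k)
        = bLoop (log.drop (i + findSkip log (some k) i s f + 1)) acc none := by
  intro f
  induction f with
  | zero =>
    intro i s acc h
    rw [List.drop_eq_nil_of_le (by omega), List.drop_eq_nil_of_le (by simp [findSkip]; omega)]
    simp [bLoop]
  | succ f ih =>
    intro i s acc h
    by_cases hi : i + s + 1 < log.length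
    · have hdrop : log.drop (i + s + 1) = log[i + s + 1] :: log.drop (i + s + 1 + 1) :=
        (List.getElem_cons_drop hi).symm
      have hget : PySem.List.pyGet? log ((i + (s + 1) : Nat) : Int) = some log[i + s + 1] := by
        rw [PySem.List.pyGet?_natCast]
        simp only [List.getElem?_eq_getElem (show i + (s + 1) < log.length by omega)]
        congr 1
      rw [hdrop]
      simp only [findSkip, hget]
      by_cases hk : pyLookup log[i + s + 1] "key" == some k
      · -- match found: both drop it and leave pending mode
        simp only [hk, if_pos, bLoop]
        have h1 : log.drop (i + (s + 1) + 1) = log.drop (i + s + 1 + 1) := by congr 1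
        rw [h1]
      · simp only [bLoop]
        have h1 : log.drop (i + s + 1 + 1) = log.drop (i + (s + 1) + 1) := by congr 1
        rw [h1, ih i (s + 1) acc (by omega)]
        simp [hk]
    · rw [List.drop_eq_nil_of_le (by omega)]
      have hget : PySem.List.pyGet? log ((i + (s + 1) : Nat) : Int) = none := by
        rw [PySem.List.pyGet?_natCast]
        exact List.getElem?_eq_none (by omega)
      simp only [findSkip, hget]
      rw [List.drop_eq_nil_of_le (by omega)]
      simp [bLoop]

-- Main loop correspondence: A at suffix drop i with skip 0 equals B at that suffix, no pending key.
theorem aLoop_eq_bLoop (log : List (List (String × String))) :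
    ∀ (f i : Nat) (acc : List (List (String × String))),
      log.length ≤ i + f →
      aLoop log (log.drop i) i acc 0 = bLoop (log.drop i) acc none := by
  intro f
  induction f with
  | zero =>
    intro i acc h
    rw [List.drop_eq_nil_of_le (by omega)]
    simp [aLoop, bLoop]
  | succ f ih =>
    intro i acc h
    by_cases hi : i < log.length
    · have hdrop : log.drop i = log[i] :: log.drop (i + 1) :=
        (List.getElem_cons_drop hi).symm
      rw [hdrop, aLoop, if_neg (by omega : ¬ (0 : Nat) > 0)]
      by_cases hp : pyLookup log[i] "action" == some "pressed"
      · by_cases hh : hotOpt (pyLookup log[i] "key") = true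
        · -- hotkey press: A sets skip, B enters pending mode
          obtain ⟨k, hk⟩ : ∃ k, pyLookup log[i] "key" = some k := by
            cases hkey : pyLookup log[i] "key" with
            | none => rw [hkey] at hh; simp [hotOpt] at hh
            | some k => exact ⟨k, rfl⟩
          rw [if_pos hp, if_pos hh]
          conv_rhs => rw [bLoop]
          rw [if_pos (show (pyLookup log[i] "action" == some "pressed"
                && hotOpt (pyLookup log[i] "key")) = true by simp [hp, hh])]
          rw [aLoop_skip log (findSkip log (pyLookup log[i] "key") i 0 log.length)
                (log.drop (i + 1)) (i + 1) acc, List.drop_drop]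
          rw [hk]
          have hpend := bLoop_pending log k log.length i 0 acc (by omega)
          simp only [Nat.add_zero] at hpend
          rw [hpend]
          have hpos := findSkip_pos log (some k) log.length i 0
          have harg : i + 1 + findSkip log (some k) i 0 log.length
              = i + findSkip log (some k) i 0 log.length + 1 := by omega
          rw [harg]
          exact ih _ acc (by omega)
        · rw [if_pos hp, if_neg hh]
          conv_rhs => rw [bLoop]
          rw [if_neg (show ¬ (pyLookup log[i] "action" == some "pressed"
                && hotOpt (pyLookup log[i] "key")) = true by simp [hh])]
          exact ih (i + 1) (acc ++ [log[i]]) (by omega)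
      · rw [if_neg hp]
        conv_rhs => rw [bLoop]
        rw [if_neg (show ¬ (pyLookup log[i] "action" == some "pressed"
              && hotOpt (pyLookup log[i] "key")) = true by simp [hp])]
        exact ih (i + 1) (acc ++ [log[i]]) (by omega)
    · rw [List.drop_eq_nil_of_le (by omega)]
      simp [aLoop, bLoop]

-- ===== VERDICT (by name: the statement is the Claim_ definition above) =====
theorem catch_hotkeys_spec : Claim_equal_catch_hotkeys := by
  intro log_list _ _
  show catch_hotkeys log_list = catch_hotkeys_alt log_list
  unfold catch_hotkeys catch_hotkeys_alt
  have := aLoop_eq_bLoop log_list log_list.length 0 [] (by omega)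
  simpa using this
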